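-- pv_equiv track=rewrite | github.com/YanQiu0207/kms | obs-local/app/parser.py | _split_event_name
-- ===== SOURCE A (Python) =====
-- from typing import Any, Iterable, Iterator, Mapping
--
-- _EVENT_SUFFIXES = ("start", "end", "error")
--
-- def _clean_text(value: Any) -> str | None:
--     if value is None:
--         return None
--     if isinstance(value, str):
--         text = value.strip()
--     else:
--         text = str(value).strip()
--     return text or None
--
-- def _split_event_name(value: str | None) -> tuple[str | None, str | None]:
--     text = _clean_text(value)
--     if text is None:
--         return None, None
--     for suffix in _EVENT_SUFFIXES:
--         marker = f".{suffix}"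
--         if text.endswith(marker):
--             return text[: -len(marker)], suffix
--     if text in _EVENT_SUFFIXES:
--         return None, text
--     return text, "event"
-- ===== SOURCE B (Python) =====
-- _EVENT_SUFFIXES = ("start", "end", "error")
--
-- def _split_event_name(value):
--     if value is None:
--         return None, None
--     text = value.strip()
--     if not text:
--         return None, None
--     head, sep, tail = text.rpartition(".")
--     if sep and tail in _EVENT_SUFFIXES:
--         return head, tail
--     if text in _EVENT_SUFFIXES:
--         return None, text
--     return text, "event"
-- ===== Notes on version B (the rewrite author's own statement) =====
-- stated objective: idiomatic
-- what changed: Replaced the loop of endswith tests over the three suffix markers by a single rpartition at the last dot that classifies the final segment directly; the clean step is inlined since the argument is already str|None.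
import Mathlib
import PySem

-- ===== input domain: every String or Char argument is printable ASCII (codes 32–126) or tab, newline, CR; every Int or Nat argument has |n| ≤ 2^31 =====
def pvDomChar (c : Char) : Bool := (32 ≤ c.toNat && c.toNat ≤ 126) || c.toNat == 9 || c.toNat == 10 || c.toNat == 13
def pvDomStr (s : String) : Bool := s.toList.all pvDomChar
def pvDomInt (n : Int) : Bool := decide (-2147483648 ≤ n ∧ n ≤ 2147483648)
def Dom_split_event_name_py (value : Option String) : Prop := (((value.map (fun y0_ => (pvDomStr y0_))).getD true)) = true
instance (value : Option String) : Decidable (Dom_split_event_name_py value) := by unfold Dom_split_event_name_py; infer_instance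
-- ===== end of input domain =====

-- B replaces A's loop of endswith tests over the suffix tuple by a single rpartition on the dot separator
-- that classifies the last dot-segment directly (objective: idiomatic; same cost).

-- ===== PORT A =====
-- _clean_text, restricted to the str|None arguments _split_event_name passes it
def clean_text_py (value : Option String) : Option String :=
  match value with
  | none => none
  | some s =>
    let text := PySem.Str.strip s
    if text = "" then none else some text

-- the 'for suffix in _EVENT_SUFFIXES' loop on code points; the marker f".{suffix}" is '.' :: sfx
def findSuffixA (text : List Char) : List (List Char) → Option (List Char × List Char)
  | [] => none
  | sfx :: rest =>
    let marker := '.' :: sfx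
    if PySem.Chars.endswith text marker then
      some (PySem.Chars.slice text none (some (-(marker.length : Int))), sfx)
    else findSuffixA text rest

def pvSuffixes : List (List Char) := ["start".toList, "end".toList, "error".toList]

def split_event_name_py (value : Option String) : Option String × Option String :=
  match clean_text_py value with
  | none => (none, none)
  | some text =>
    match findSuffixA text.toList pvSuffixes with
    | some (h, sfx) => (some (String.ofList h), some (String.ofList sfx))
    | none =>
      if pvSuffixes.contains text.toList then (none, some text)
      else (some text, some "event")

-- ===== PORT B =====
-- text.rpartition on the dot separator, on code points, hand-ported (exact for this one-character separator):
-- scan the reversed string up to its first '.', i.e. the last '.' of text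
def rpartitionDot (cs : List Char) : List Char × List Char × List Char :=
  let r := cs.reverse
  let tailRev := r.takeWhile (· != '.')
  match r.dropWhile (· != '.') with
  | [] => ([], [], cs)
  | _ :: headRev => (headRev.reverse, ['.'], tailRev.reverse)

def split_event_name_py_alt (value : Option String) : Option String × Option String :=
  match value with
  | none => (none, none)
  | some s =>
    let text := PySem.Str.strip s
    if text = "" then (none, none)
    else
      match rpartitionDot text.toList with
      | (head, sep, tl) =>
        if sep ≠ [] ∧ ["start", "end", "error"].contains (String.ofList tl) then
          (some (String.ofList head), some (String.ofList tl))
        else if ["start", "end", "error"].contains text then (none, some text)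
        else (some text, some "event")

-- ===== PRECONDITION & SPEC =====
def Spec_split_event_name_py (value : Option String) (out : Option String × Option String) : Prop := out = split_event_name_py_alt value
instance (value : Option String) (out : Option String × Option String) : Decidable (Spec_split_event_name_py value out) := by unfold Spec_split_event_name_py; infer_instance

-- ===== CLAIM (what is proved, stated in full; the proofs are below) =====
def Claim_equal_split_event_name_py : Prop := ∀ (value : Option String), Dom_split_event_name_py value → Spec_split_event_name_py value (split_event_name_py value)

-- ===== LEMMAS AND PROOFS =====

-- splitting at the last '.' of a list that ends in '.' :: u (seen from the reversed side)
theorem nodot_takeWhile {s : List Char} (u : List Char) (hs : '.' ∉ s) :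
    (s ++ '.' :: u).takeWhile (· != '.') = s ∧ (s ++ '.' :: u).dropWhile (· != '.') = '.' :: u := by
  induction s with
  | nil => simp
  | cons a s ih =>
    have ha : a ≠ '.' := fun h => hs (by simp [h])
    have h2 := ih (fun h => hs (List.mem_cons_of_mem _ h))
    simp [ha, h2.1, h2.2]

-- l ends with '.' :: s  ↔  the reversed l starts with s.reverse and then a '.'
theorem suffix_iff_rev {l s : List Char} (hs : '.' ∉ s) :
    ('.' :: s) <:+ l ↔
      (l.reverse.takeWhile (· != '.') = s.reverse ∧
       ∃ u, l.reverse.dropWhile (· != '.') = '.' :: u) := by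
  constructor
  · rintro ⟨t, rfl⟩
    have hrev : (t ++ '.' :: s).reverse = s.reverse ++ '.' :: t.reverse := by simp
    have hs' : '.' ∉ s.reverse := by simpa using hs
    have h := nodot_takeWhile (s := s.reverse) t.reverse hs'
    rw [hrev]
    exact ⟨h.1, t.reverse, h.2⟩
  · rintro ⟨htk, u, hdp⟩
    have hsplit : l.reverse = s.reverse ++ '.' :: u := by
      conv_lhs => rw [← List.takeWhile_append_dropWhile (p := (· != '.')) (l := l.reverse)]
      rw [htk, hdp]
    have hl : l = u.reverse ++ '.' :: s := by
      have h2 := congrArg List.reverse hsplit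
      simpa using h2
    exact ⟨u.reverse, hl.symm⟩

theorem ofList_eq_iff (cs : List Char) (t : String) : String.ofList cs = t ↔ cs = t.toList := by
  constructor
  · rintro rfl; simp
  · rintro rfl; simp

theorem eq_lit_iff (t s : String) : (t = s) ↔ (t.toList = s.toList) := String.toList_inj.symm

-- A's text[:-len(marker)] on text = u ++ marker is exactly u
theorem slice_neg (u s : List Char) (k : Nat) (hk : k = s.length) (h0 : 0 < k) :
    PySem.List.slice (u ++ s) none (some (-(k : Int))) = u := by
  subst hk
  rw [PySem.List.slice_to_neg_natCast _ _ h0]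
  simp

-- the core equality: A's suffix loop and B's rpartition classify any text identically
theorem core_eq (text : String) :
    (match findSuffixA text.toList pvSuffixes with
      | some (h, sfx) => (some (String.ofList h), some (String.ofList sfx))
      | none =>
        if pvSuffixes.contains text.toList then (none, some text)
        else (some text, some "event")) =
    (match rpartitionDot text.toList with
      | (head, sep, tl) =>
        if sep ≠ [] ∧ ["start", "end", "error"].contains (String.ofList tl) then
          (some (String.ofList head), some (String.ofList tl))
        else if ["start", "end", "error"].contains text then (none, some text)
        else (some text, some "event")) := by
  cases hdp : text.toList.reverse.dropWhile (· != '.') with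
  | nil =>
    have hend : ∀ s : List Char, '.' ∉ s → PySem.Chars.endswith text.toList ('.' :: s) = false := by
      intro s hs
      apply Bool.eq_false_iff.mpr
      intro h
      have h2 := (suffix_iff_rev hs).mp ((PySem.Chars.endswith_iff _ _).mp h)
      rcases h2.2 with ⟨u, hu⟩
      rw [hdp] at hu
      exact List.cons_ne_nil _ _ hu.symm
    have h1 := hend "start".toList (by decide)
    have h2 := hend "end".toList (by decide)
    have h3 := hend "error".toList (by decide)
    simp only [findSuffixA, pvSuffixes, h1, h2, h3, Bool.false_eq_true, if_false,
      rpartitionDot, hdp]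
    simp [eq_lit_iff]
  | cons c u =>
    have hc : c = '.' := by
      have w : text.toList.reverse.dropWhile (· != '.') ≠ [] := by simp [hdp]
      have h2 := List.head_dropWhile_not (· != '.') w
      simp [hdp] at h2
      exact h2
    subst hc
    have hsplit : text.toList.reverse
        = text.toList.reverse.takeWhile (· != '.') ++ '.' :: u := by
      conv_lhs => rw [← List.takeWhile_append_dropWhile (p := (· != '.')) (l := text.toList.reverse)]
      rw [hdp]
    have hl : text.toList = u.reverse ++ '.' :: (text.toList.reverse.takeWhile (· != '.')).reverse := by
      have h2 := congrArg List.reverse hsplit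
      simpa using h2
    have hends : ∀ s : List Char, '.' ∉ s →
        (PySem.Chars.endswith text.toList ('.' :: s)
          = ((text.toList.reverse.takeWhile (· != '.')).reverse == s)) := by
      intro s hs
      by_cases h : (text.toList.reverse.takeWhile (· != '.')).reverse = s
      · have htk : text.toList.reverse.takeWhile (· != '.') = s.reverse := by
          rw [← h]; simp
        rw [(PySem.Chars.endswith_iff _ _).mpr ((suffix_iff_rev hs).mpr ⟨htk, u, hdp⟩)]
        simp [h]
      · have hne : PySem.Chars.endswith text.toList ('.' :: s) = false := by
          apply Bool.eq_false_iff.mpr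
          intro h'
          have h2 := (suffix_iff_rev hs).mp ((PySem.Chars.endswith_iff _ _).mp h')
          exact h (by rw [h2.1]; simp)
        rw [hne]
        simp [h]
    have e1 := hends "start".toList (by decide)
    have e2 := hends "end".toList (by decide)
    have e3 := hends "error".toList (by decide)
    set tl := (text.toList.reverse.takeWhile (· != '.')).reverse with htl
    by_cases c1 : tl = ['s', 't', 'a', 'r', 't']
    · simp only [findSuffixA, pvSuffixes, e1, c1, rpartitionDot, hdp]
      rw [hl]
      simp [c1, ofList_eq_iff]
      exact_mod_cast slice_neg u.reverse ['.', 's', 't', 'a', 'r', 't'] 6 rfl (by norm_num)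
    · by_cases c2 : tl = ['e', 'n', 'd']
      · simp only [findSuffixA, pvSuffixes, e1, e2, c2, rpartitionDot, hdp]
        rw [hl]
        simp [c2, ofList_eq_iff]
        exact_mod_cast slice_neg u.reverse ['.', 'e', 'n', 'd'] 4 rfl (by norm_num)
      · by_cases c3 : tl = ['e', 'r', 'r', 'o', 'r']
        · simp only [findSuffixA, pvSuffixes, e1, e2, e3, c3, rpartitionDot, hdp]
          rw [hl]
          simp [c3, ofList_eq_iff]
          exact_mod_cast slice_neg u.reverse ['.', 'e', 'r', 'r', 'o', 'r'] 6 rfl (by norm_num)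
        · have r1 : ¬ text.toList.reverse.takeWhile (· != '.') = ['t', 'r', 'a', 't', 's'] := by
            intro h; exact c1 (by rw [htl, h]; simp)
          have r2 : ¬ text.toList.reverse.takeWhile (· != '.') = ['d', 'n', 'e'] := by
            intro h; exact c2 (by rw [htl, h]; simp)
          have r3 : ¬ text.toList.reverse.takeWhile (· != '.') = ['r', 'o', 'r', 'r', 'e'] := by
            intro h; exact c3 (by rw [htl, h]; simp)
          simp only [findSuffixA, pvSuffixes, e1, e2, e3, rpartitionDot, hdp]
          simp [c1, c2, c3, r1, r2, r3, eq_lit_iff]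

-- reductions of the two ports at a non-empty cleaned text
theorem A_eq_core (s : String) (h : ¬ PySem.Str.strip s = "") :
    split_event_name_py (some s) =
      (match findSuffixA (PySem.Str.strip s).toList pvSuffixes with
        | some (hd, sfx) => (some (String.ofList hd), some (String.ofList sfx))
        | none =>
          if pvSuffixes.contains (PySem.Str.strip s).toList then (none, some (PySem.Str.strip s))
          else (some (PySem.Str.strip s), some "event")) := by
  have hc : clean_text_py (some s) = some (PySem.Str.strip s) := by
    unfold clean_text_py
    exact if_neg h
  unfold split_event_name_py
  rw [hc]

theorem B_eq_core (s : String) (h : ¬ PySem.Str.strip s = "") :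
    split_event_name_py_alt (some s) =
      (match rpartitionDot (PySem.Str.strip s).toList with
        | (head, sep, tl) =>
          if sep ≠ [] ∧ ["start", "end", "error"].contains (String.ofList tl) then
            (some (String.ofList head), some (String.ofList tl))
          else if ["start", "end", "error"].contains (PySem.Str.strip s) then
            (none, some (PySem.Str.strip s))
          else (some (PySem.Str.strip s), some "event")) := by
  unfold split_event_name_py_alt
  exact if_neg h

-- ===== VERDICT (by name: the statement is the Claim_ definition above) =====
theorem split_event_name_py_spec : Claim_equal_split_event_name_py := by
  intro value _
  unfold Spec_split_event_name_py
  cases value with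
  | none => rfl
  | some s =>
    by_cases h : PySem.Str.strip s = ""
    · have hc : clean_text_py (some s) = none := by
        unfold clean_text_py
        exact if_pos h
      have hA : split_event_name_py (some s) = (none, none) := by
        unfold split_event_name_py
        rw [hc]
      have hB : split_event_name_py_alt (some s) = (none, none) := by
        unfold split_event_name_py_alt
        exact if_pos h
      rw [hA, hB]
    · rw [A_eq_core s h, B_eq_core s h]
      exact core_eq (PySem.Str.strip s)
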